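-- pv_equiv track=rewrite | github.com/271ch/fomantic-ui-vue | utils/genExampleTemplates.py | prepTextJS
-- ===== SOURCE A (Python) =====
-- def prepTextJS(t):
--   t2 = t.split('\n')
--   t3=[]
--   first = True
--   for l in t2:
--     l2 = l.strip()
--     if l2 != '':
--       t3.append(('' if first else '      ')+'\''+l.replace('\'','\\\'')+'\\n\' +')
--       first = False
--   if len(t3) >0 and len(t3[len(t3)-1])>1:
--     t3[len(t3)-1]=t3[len(t3)-1][:-2]
--   return '\n'.join(t3)
-- ===== SOURCE B (Python) =====
-- def prepTextJS(t):
--   cores = ["'" + l.replace("'", "\\'") + "\\n'" for l in t.split('\n') if l.strip() != '']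
--   return ' +\n      '.join(cores)
-- ===== Notes on version B (the rewrite author's own statement) =====
-- stated objective: simpler
-- what changed: B replaces A's stateful loop (a first-flag choosing the indentation prefix, every piece suffixed with plus signs) and the post-loop slicing fixup of the last element by a single comprehension of the core quoted pieces and one join with a compound separator that produces the prefix and suffixes implicitly.
import Mathlib
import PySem

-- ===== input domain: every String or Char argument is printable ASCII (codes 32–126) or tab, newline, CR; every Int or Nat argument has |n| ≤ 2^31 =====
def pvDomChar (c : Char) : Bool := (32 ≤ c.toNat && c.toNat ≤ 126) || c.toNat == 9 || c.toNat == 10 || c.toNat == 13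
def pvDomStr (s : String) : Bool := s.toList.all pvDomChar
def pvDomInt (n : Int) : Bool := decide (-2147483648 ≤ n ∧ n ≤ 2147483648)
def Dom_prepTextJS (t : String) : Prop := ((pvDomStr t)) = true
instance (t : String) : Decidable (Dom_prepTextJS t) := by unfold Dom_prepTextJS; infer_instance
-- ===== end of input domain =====

-- B replaces A's first-flag loop and post-loop [:-2] fixup by a comprehension of the core
-- pieces joined with the compound separator " +\n      " (objective: simpler).


-- ===== PORT A =====
-- the loop body: l2 = l.strip(); if l2 != '': t3.append(...); first = False
def pvStepA (st : List String × Bool) (l : String) : List String × Bool :=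
  let l2 := PySem.Str.strip l
  if l2 ≠ "" then
    (st.1 ++ [(if st.2 then "" else "      ") ++ "'" ++ PySem.Str.replace l "'" "\\'" ++ "\\n' +"],
     false)
  else st

-- the post-loop fixup (t3[-1] = t3[-1][:-2] when len(t3)>0 and len(t3[-1])>1) and the join
def pvFixJoinA (t3 : List String) : String :=
  let t3' :=
    if 0 < t3.length ∧ 1 < PySem.Str.len (t3.getD (t3.length - 1) "") then
      t3.take (t3.length - 1) ++ [PySem.Str.slice (t3.getD (t3.length - 1) "") none (some (-2))]
    else t3
  PySem.Str.join "\n" t3'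

def prepTextJS (t : String) : String :=
  -- t.split('\n'): sep is the non-empty literal "\n", so Str.split? is always `some`
  let t2 := (PySem.Str.split? t "\n").getD []
  let t3 := (t2.foldl pvStepA ([], true)).1
  pvFixJoinA t3

-- ===== PORT B =====
def prepTextJS_alt (t : String) : String :=
  let cores :=
    (((PySem.Str.split? t "\n").getD []).filter
        (fun l => PySem.Str.strip l ≠ "")).map
      (fun l => "'" ++ PySem.Str.replace l "'" "\\'" ++ "\\n'")
  PySem.Str.join " +\n      " cores

-- ===== PRECONDITION & SPEC =====
def Spec_prepTextJS (t : String) (out : String) : Prop := out = prepTextJS_alt t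
instance (t : String) (out : String) : Decidable (Spec_prepTextJS t out) := by unfold Spec_prepTextJS; infer_instance

-- ===== CLAIM (what is proved, stated in full; the proofs are below) =====
def Claim_equal_prepTextJS : Prop := ∀ (t : String), Dom_prepTextJS t → Spec_prepTextJS t (prepTextJS t)

-- ===== LEMMAS AND PROOFS =====

def pvCore (l : String) : String := "'" ++ PySem.Str.replace l "'" "\\'" ++ "\\n'"
def pvP (l : String) : Bool := PySem.Str.strip l ≠ ""

theorem pv_toList_inj {s t : String} (h : s.toList = t.toList) : s = t :=
  String.toList_inj.mp h

theorem pv_join_nil (sep : String) : PySem.Str.join sep [] = "" := by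
  apply pv_toList_inj
  simp [PySem.Str.toList_join, PySem.Chars.join, List.intercalate]

theorem pv_join_singleton (sep a : String) : PySem.Str.join sep [a] = a := by
  apply pv_toList_inj
  simp [PySem.Str.toList_join, PySem.Chars.join, List.intercalate]

theorem pv_join_cons_cons (sep a b : String) (l : List String) :
    PySem.Str.join sep (a :: b :: l) = a ++ sep ++ PySem.Str.join sep (b :: l) := by
  apply pv_toList_inj
  simp [PySem.Str.toList_join, PySem.Chars.join_cons_cons]

theorem pv_join_cons_ne_nil (sep a : String) (l : List String) (h : l ≠ []) :
    PySem.Str.join sep (a :: l) = a ++ sep ++ PySem.Str.join sep l := by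
  cases l with
  | nil => exact absurd rfl h
  | cons b l => exact pv_join_cons_cons sep a b l

theorem pv_join_cons_append (sep a b : String) (l : List String) :
    PySem.Str.join sep ((a ++ b) :: l) = a ++ PySem.Str.join sep (b :: l) := by
  cases l with
  | nil => simp [pv_join_singleton]
  | cons c l => simp [pv_join_cons_cons, String.append_assoc]

theorem pv_len_append_plus (x : String) : PySem.Str.len (x ++ " +") = (x.length : Int) + 2 := by
  simp [PySem.Str.len]

theorem pv_slice_minus_two (x : String) :
    PySem.Str.slice (x ++ " +") none (some (-2)) = x := by
  apply pv_toList_inj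
  rw [PySem.Str.toList_slice]
  rw [PySem.Chars.slice_eq_listSlice]
  rw [show ((-2 : Int) = -((2 : Nat) : Int)) by norm_num,
      PySem.List.slice_to_neg_natCast _ 2 (by omega)]
  simp

-- the fold with first = False appends the six-space-prefixed pieces
theorem pv_fold_false (ls : List String) (acc : List String) :
    ls.foldl pvStepA (acc, false) =
      (acc ++ (ls.filter pvP).map (fun l => "      " ++ pvCore l ++ " +"), false) := by
  induction ls generalizing acc with
  | nil => simp
  | cons l ls ih =>
    by_cases h : PySem.Str.strip l ≠ ""
    · simp only [List.foldl_cons, pvStepA, if_pos h, ih, List.filter_cons, pvP, pvCore]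
      simp [h, String.append_assoc]
      rfl
    · simp only [List.foldl_cons, pvStepA, if_neg h, ih, List.filter_cons, pvP]
      simp at h
      simp [h]

-- the fold with first = True: the first retained piece gets no prefix
theorem pv_fold_true (ls : List String) :
    (ls.foldl pvStepA ([], true)).1 =
      match (ls.filter pvP) with
      | [] => []
      | l :: rest => (pvCore l ++ " +") :: rest.map (fun l => "      " ++ pvCore l ++ " +") := by
  induction ls with
  | nil => simp
  | cons l ls ih =>
    by_cases h : PySem.Str.strip l ≠ ""
    · simp only [List.foldl_cons, pvStepA, if_pos h, List.filter_cons]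
      rw [pv_fold_false]
      simp [pvP, h, pvCore, String.append_assoc]
    · simp only [List.foldl_cons, pvStepA, if_neg h, List.filter_cons]
      simp at h
      simp [pvP, h, ih]

-- peeling the head off the fixup+join: the fixup only touches the last element
theorem pvFix_cons (a y : String) (l : List String) :
    pvFixJoinA (a :: y :: l) = a ++ "\n" ++ pvFixJoinA (y :: l) := by
  simp only [pvFixJoinA, List.length_cons]
  have hgd : (a :: y :: l).getD (l.length + 1 + 1 - 1) "" = (y :: l).getD (l.length + 1 - 1) "" := by
    simp [List.getD]
    rfl
  rw [hgd]
  by_cases hc : 1 < PySem.Str.len ((y :: l).getD (l.length + 1 - 1) "")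
  · rw [if_pos ⟨by omega, hc⟩, if_pos ⟨by omega, hc⟩]
    have ht : List.take (l.length + 1 + 1 - 1) (a :: y :: l)
        = a :: List.take (l.length + 1 - 1) (y :: l) := by
      simp
    rw [ht, List.cons_append, pv_join_cons_ne_nil _ _ _ (by simp)]
  · rw [if_neg (fun h => hc h.2), if_neg (fun h => hc h.2)]
    exact pv_join_cons_cons _ _ _ _

-- the fixup+join of A's pieces is the compound-separator join of the cores
theorem pv_aux (restl : List String) (d : String) :
    pvFixJoinA ((d ++ " +") :: restl.map (fun c => "      " ++ c ++ " +")) =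
      PySem.Str.join " +\n      " (d :: restl) := by
  induction restl generalizing d with
  | nil =>
    simp only [List.map_nil, pvFixJoinA]
    split_ifs with hcond
    · simp [List.getD, pv_slice_minus_two, pv_join_singleton]
    · exfalso
      apply hcond
      refine ⟨by simp, ?_⟩
      have hg : ([d ++ " +"] : List String).getD (([d ++ " +"] : List String).length - 1) "" = d ++ " +" := by
        simp [List.getD]
      rw [hg, pv_len_append_plus]
      omega
  | cons e restl ih =>
    rw [List.map_cons, pvFix_cons, ih ("      " ++ e), pv_join_cons_append,
        pv_join_cons_ne_nil " +\n      " d (e :: restl) (by simp)]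
    apply pv_toList_inj
    simp [String.toList_append]

-- ===== VERDICT (by name: the statement is the Claim_ definition above) =====
theorem prepTextJS_spec : Claim_equal_prepTextJS := by
  intro t _
  unfold Spec_prepTextJS
  show pvFixJoinA ((((PySem.Str.split? t "\n").getD []).foldl pvStepA ([], true)).1)
      = PySem.Str.join " +\n      "
          ((((PySem.Str.split? t "\n").getD []).filter
              (fun l => decide (PySem.Str.strip l ≠ ""))).map
            (fun l => "'" ++ PySem.Str.replace l "'" "\\'" ++ "\\n'"))
  set ls := (PySem.Str.split? t "\n").getD [] with hls
  rw [pv_fold_true]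
  have hfilter : ls.filter (fun l => decide (PySem.Str.strip l ≠ "")) = ls.filter pvP := by
    apply List.filter_congr
    intro x _
    simp [pvP]
  rw [hfilter]
  cases h : ls.filter pvP with
  | nil => simp [pvFixJoinA, pv_join_nil]
  | cons l rest =>
    have := pv_aux (rest.map pvCore) (pvCore l)
    rw [List.map_map] at this
    simpa [pvCore, Function.comp] using this
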